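-- pv_equiv track=rewrite | github.com/estebanstack/HPC | Taller2/multicore.py | _worker_chunk
-- ===== SOURCE A (Python) =====
-- import math
--
-- KX = [[-1, 0, 1],
--       [-2, 0, 2],
--       [-1, 0, 1]]
--
-- KY = [[-1, -2, -1],
--       [ 0,  0,  0],
--       [ 1,  2,  1]]
--
-- def sobel_pixel(gray, i, j):
--     """Calcula la magnitud del gradiente en (i,j) usando KX y KY manualmente."""
--     gx = (gray[i-1][j-1]*KX[0][0] + gray[i-1][j]*KX[0][1] + gray[i-1][j+1]*KX[0][2] +
--           gray[i][j-1]*KX[1][0]   + gray[i][j]*KX[1][1]   + gray[i][j+1]*KX[1][2] +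
--           gray[i+1][j-1]*KX[2][0] + gray[i+1][j]*KX[2][1] + gray[i+1][j+1]*KX[2][2])
--
--     gy = (gray[i-1][j-1]*KY[0][0] + gray[i-1][j]*KY[0][1] + gray[i-1][j+1]*KY[0][2] +
--           gray[i][j-1]*KY[1][0]   + gray[i][j]*KY[1][1]   + gray[i][j+1]*KY[1][2] +
--           gray[i+1][j-1]*KY[2][0] + gray[i+1][j]*KY[2][1] + gray[i+1][j+1]*KY[2][2])
--
--     mag = int(min(255, math.sqrt(gx*gx + gy*gy)))
--     return mag
--
-- def _worker_chunk(args):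
--     """Worker para procesar un rango de filas [i0, i1) (sin tocar bordes)."""
--     gray, i0, i1, w = args
--     # Cada worker devuelve una lista de filas (matrices parciales)
--     partial = []
--     for i in range(i0, i1):
--         row = [0]*w
--         for j in range(1, w-1):
--             row[j] = sobel_pixel(gray, i, j)
--         partial.append((i, row))
--     return partial
-- ===== SOURCE B (Python) =====
-- import math
--
-- def _hbufs(row, w):
--     # horizontal passes of the separable Sobel kernels
--     hd = [row[j + 1] - row[j - 1] for j in range(1, w - 1)]
--     hs = [row[j - 1] + 2 * row[j] + row[j + 1] for j in range(1, w - 1)]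
--     return hd, hs
--
-- def _worker_chunk(args):
--     gray, i0, i1, w = args
--     if i1 <= i0:
--         return []
--     if w < 3:
--         return [(i, [0] * w) for i in range(i0, i1)]
--     # one horizontal pass per touched row, then a vertical combine
--     bl = [_hbufs(gray[r], w) for r in range(i0 - 1, i1 + 1)]
--     out = []
--     for t in range(i1 - i0):
--         hd0, hs0 = bl[t]
--         hd1 = bl[t + 1][0]
--         hd2, hs2 = bl[t + 2]
--         vals = [min(255, math.isqrt((hd0[k] + 2 * hd1[k] + hd2[k]) ** 2
--                                     + (hs2[k] - hs0[k]) ** 2))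
--                 for k in range(w - 2)]
--         out.append((i0 + t, [0] + vals + [0]))
--     return out
-- ===== Notes on version B (the rewrite author's own statement) =====
-- stated objective: alternative
-- what changed: Replaces the per-pixel 3x3 kernel convolution (sobel_pixel called for every pixel with 18 multiplies against the KX/KY tables) by a separable two-pass scheme: one horizontal pass per touched row precomputes hdiff/hsum buffers once, then a vertical combine builds each output row as [0]+vals+[0], and int(min(255,sqrt(s))) becomes min(255,isqrt(s)); it trades the kernel-table inner loop for extra buffer lists of the same asymptotic cost.
import Mathlib
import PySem

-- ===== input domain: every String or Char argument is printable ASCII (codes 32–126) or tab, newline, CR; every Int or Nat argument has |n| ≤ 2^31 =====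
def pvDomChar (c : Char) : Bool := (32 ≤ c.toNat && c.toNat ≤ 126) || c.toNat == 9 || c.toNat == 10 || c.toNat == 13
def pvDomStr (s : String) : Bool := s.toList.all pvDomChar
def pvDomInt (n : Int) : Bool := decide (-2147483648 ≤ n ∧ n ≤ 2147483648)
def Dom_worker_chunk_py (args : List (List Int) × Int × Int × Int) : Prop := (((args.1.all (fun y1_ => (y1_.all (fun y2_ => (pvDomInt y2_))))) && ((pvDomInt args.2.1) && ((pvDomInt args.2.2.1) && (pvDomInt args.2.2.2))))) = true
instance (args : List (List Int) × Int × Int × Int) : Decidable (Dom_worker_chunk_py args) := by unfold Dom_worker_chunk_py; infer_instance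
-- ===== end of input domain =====

-- B replaces the per-pixel 3x3 convolution by a separable horizontal-pass (hdiff/hsum buffers)
-- + vertical-combine scheme; return values proved equal on all inputs on which A returns (Pre_).

-- ===== PORT A =====
def pvKX : List (List Int) := [[-1, 0, 1], [-2, 0, 2], [-1, 0, 1]]
def pvKY : List (List Int) := [[-1, -2, -1], [0, 0, 0], [1, 2, 1]]

-- gray[i][j] with Python index semantics; the default is never reached under Pre_
def pvAt (gray : List (List Int)) (i j : Int) : Int :=
  PySem.List.pyGetD (PySem.List.pyGetD gray i []) j 0

def pvK (K : List (List Int)) (r c : Int) : Int :=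
  PySem.List.pyGetD (PySem.List.pyGetD K r []) c 0

-- int(min(255, math.sqrt s)) for an integer s = gx*gx+gy*gy ≥ 0: exact, because for s ≥ 255²
-- min clamps to 255, and for 0 ≤ s < 255² the correctly rounded double sqrt of the exactly
-- representable s has the same floor as the integer square root.
def pvMag (s : Int) : Int :=
  if 255 * 255 ≤ s then 255 else (Nat.sqrt s.toNat : Int)

def sobel_pixel (gray : List (List Int)) (i j : Int) : Int :=
  let gx := pvAt gray (i-1) (j-1) * pvK pvKX 0 0 + pvAt gray (i-1) j * pvK pvKX 0 1 + pvAt gray (i-1) (j+1) * pvK pvKX 0 2 +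
            pvAt gray i (j-1) * pvK pvKX 1 0 + pvAt gray i j * pvK pvKX 1 1 + pvAt gray i (j+1) * pvK pvKX 1 2 +
            pvAt gray (i+1) (j-1) * pvK pvKX 2 0 + pvAt gray (i+1) j * pvK pvKX 2 1 + pvAt gray (i+1) (j+1) * pvK pvKX 2 2
  let gy := pvAt gray (i-1) (j-1) * pvK pvKY 0 0 + pvAt gray (i-1) j * pvK pvKY 0 1 + pvAt gray (i-1) (j+1) * pvK pvKY 0 2 +
            pvAt gray i (j-1) * pvK pvKY 1 0 + pvAt gray i j * pvK pvKY 1 1 + pvAt gray i (j+1) * pvK pvKY 1 2 +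
            pvAt gray (i+1) (j-1) * pvK pvKY 2 0 + pvAt gray (i+1) j * pvK pvKY 2 1 + pvAt gray (i+1) (j+1) * pvK pvKY 2 2
  pvMag (gx * gx + gy * gy)

def worker_chunk_py (args : List (List Int) × Int × Int × Int) : List (Int × List Int) :=
  let gray := args.1
  let i0 := args.2.1
  let i1 := args.2.2.1
  let w := args.2.2.2
  (PySem.List.pyRange i0 i1 1).foldl (fun partial_ i =>
    let row := List.replicate w.toNat (0 : Int)
    let row := (PySem.List.pyRange 1 (w - 1) 1).foldl
      (fun row j => PySem.List.pySetD row j (sobel_pixel gray i j)) row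
    partial_ ++ [(i, row)]) []

-- ===== PORT B =====
def pvHbufs (row : List Int) (w : Int) : List Int × List Int :=
  ((PySem.List.pyRange 1 (w - 1) 1).map (fun j =>
      PySem.List.pyGetD row (j + 1) 0 - PySem.List.pyGetD row (j - 1) 0),
   (PySem.List.pyRange 1 (w - 1) 1).map (fun j =>
      PySem.List.pyGetD row (j - 1) 0 + 2 * PySem.List.pyGetD row j 0 + PySem.List.pyGetD row (j + 1) 0))

def worker_chunk_py_alt (args : List (List Int) × Int × Int × Int) : List (Int × List Int) :=
  let gray := args.1
  let i0 := args.2.1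
  let i1 := args.2.2.1
  let w := args.2.2.2
  if i1 ≤ i0 then []
  else if w < 3 then
    (PySem.List.pyRange i0 i1 1).map (fun i => (i, List.replicate w.toNat (0 : Int)))
  else
    let bl := (PySem.List.pyRange (i0 - 1) (i1 + 1) 1).map
      (fun r => pvHbufs (PySem.List.pyGetD gray r []) w)
    (PySem.List.pyRange 0 (i1 - i0) 1).map (fun t =>
      let b0 := PySem.List.pyGetD bl t ([], [])
      let b1 := PySem.List.pyGetD bl (t + 1) ([], [])
      let b2 := PySem.List.pyGetD bl (t + 2) ([], [])
      let vals := (PySem.List.pyRange 0 (w - 2) 1).map (fun k =>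
        let gx := PySem.List.pyGetD b0.1 k 0 + 2 * PySem.List.pyGetD b1.1 k 0 + PySem.List.pyGetD b2.1 k 0
        let gy := PySem.List.pyGetD b2.2 k 0 - PySem.List.pyGetD b0.2 k 0
        min 255 ((Nat.sqrt (gx * gx + gy * gy).toNat : Nat) : Int))
      (i0 + t, (0 : Int) :: (vals ++ [0])))

-- ===== PRECONDITION & SPEC =====
-- Pre_ excludes exactly the IndexError inputs: whenever the pixel loop runs (i0 < i1 and w >= 3),
-- every touched row index i0-1 .. i1 must be a valid Python index into gray (negative indices count
-- from the end) and every row those indices reach must have at least w entries (columns 0 .. w-1 are read).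
def Pre_worker_chunk_py (args : List (List Int) × Int × Int × Int) : Prop :=
  3 ≤ args.2.2.2 → args.2.1 < args.2.2.1 →
    (-(args.1.length : Int) ≤ args.2.1 - 1 ∧ args.2.2.1 < (args.1.length : Int) ∧
     ∀ p ∈ PySem.List.enumerate args.1 0,
       ((args.2.1 - 1 ≤ p.1 ∧ p.1 ≤ args.2.2.1) ∨
        (args.2.1 - 1 ≤ p.1 - (args.1.length : Int) ∧ p.1 - (args.1.length : Int) ≤ args.2.2.1)) →
         args.2.2.2 ≤ (p.2.length : Int))
instance (args : List (List Int) × Int × Int × Int) : Decidable (Pre_worker_chunk_py args) := by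
  unfold Pre_worker_chunk_py; infer_instance

def pvWitness_worker_chunk_py : (List (List Int) × Int × Int × Int) :=
  ([[1, 2, 3], [4, 5, 6], [7, 8, 9]], 1, 2, 3)

def Spec_worker_chunk_py (args : List (List Int) × Int × Int × Int) (out : List (Int × List Int)) : Prop := out = worker_chunk_py_alt args
instance (args : List (List Int) × Int × Int × Int) (out : List (Int × List Int)) : Decidable (Spec_worker_chunk_py args out) := by unfold Spec_worker_chunk_py; infer_instance

-- ===== CLAIM (what is proved, stated in full; the proofs are below) =====
def Claim_equal_worker_chunk_py : Prop := ∀ (args : List (List Int) × Int × Int × Int), Dom_worker_chunk_py args → Pre_worker_chunk_py args → Spec_worker_chunk_py args (worker_chunk_py args)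

-- ===== LEMMAS AND PROOFS =====

-- magnitude: A's clamped float-sqrt port equals B's min-with-isqrt for s ≥ 0
lemma pvMag_eq (s : Int) (hs : 0 ≤ s) : pvMag s = min 255 ((Nat.sqrt s.toNat : Nat) : Int) := by
  unfold pvMag
  split_ifs with h
  · have h2 : (255 : Nat) ≤ Nat.sqrt s.toNat := Nat.le_sqrt.mpr (by omega)
    omega
  · have h2 : Nat.sqrt s.toNat < 255 := by
      rw [Nat.sqrt_lt]; omega
    omega

lemma mag_min_eq (gx gy gx' gy' : Int) (h1 : gx = gx') (h2 : gy = gy') :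
    pvMag (gx * gx + gy * gy)
      = min 255 ((Nat.sqrt (gx' * gx' + gy' * gy').toNat : Nat) : Int) := by
  subst h1; subst h2
  exact pvMag_eq _ (add_nonneg (mul_self_nonneg _) (mul_self_nonneg _))

-- B's separable horizontal combinations, named for readability of the lemmas below
def pvGX (g : List (List Int)) (i j : Int) : Int :=
  (pvAt g (i-1) (j+1) - pvAt g (i-1) (j-1))
    + 2 * (pvAt g i (j+1) - pvAt g i (j-1))
    + (pvAt g (i+1) (j+1) - pvAt g (i+1) (j-1))

def pvGY (g : List (List Int)) (i j : Int) : Int :=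
  (pvAt g (i+1) (j-1) + 2 * pvAt g (i+1) j + pvAt g (i+1) (j+1))
    - (pvAt g (i-1) (j-1) + 2 * pvAt g (i-1) j + pvAt g (i-1) (j+1))

-- A's kernel convolution at (i,j), written in B's separable hdiff/hsum form
lemma sobel_pixel_eq (g : List (List Int)) (i j : Int) :
    sobel_pixel g i j =
      min 255 ((Nat.sqrt (pvGX g i j * pvGX g i j + pvGY g i j * pvGY g i j).toNat : Nat) : Int) := by
  simp only [sobel_pixel]
  apply mag_min_eq <;>
    · simp only [pvGX, pvGY, pvK, pvKX, pvKY]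
      norm_num [PySem.List.pyGetD, PySem.List.pyGet?, PySem.List.pyIdx?, show Int.toNat 2 = 2 from rfl]
      ring

-- folding in-place sets at positions a..b-1 rebuilds the list from its pieces
lemma foldl_set_range (f : Int → Int) (init : List Int) (a b : Int)
    (ha : 0 ≤ a) (hab : a ≤ b) (hb : b ≤ (init.length : Int)) :
    (PySem.List.pyRange a b 1).foldl (fun row j => PySem.List.pySetD row j (f j)) init
      = init.take a.toNat ++ (PySem.List.pyRange a b 1).map f ++ init.drop b.toNat := by
  induction b, hab using Int.le_induction with
  | base =>
      simp [PySem.List.pyRange_one_eq_nil (le_refl a), List.take_append_drop]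
  | succ b hab ih =>
      rw [PySem.List.pyRange_one_succ_right hab, List.foldl_append, List.map_append,
        ih (by omega)]
      simp only [List.foldl_cons, List.foldl_nil, List.map_cons, List.map_nil]
      rw [PySem.List.pySetD_of_nonneg _ _ (by omega : (0:Int) ≤ b)]
      have hta : (init.take a.toNat).length = a.toNat := by
        rw [List.length_take]; omega
      have hlt : b.toNat < init.length := by omega
      rw [List.append_assoc, List.set_append_right _ _ (by rw [hta]; omega),
        List.set_append_right _ _ (by rw [List.length_map, PySem.List.length_pyRange_one]; omega)]
      rw [List.drop_eq_getElem_cons hlt]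
      have h0 : b.toNat - (init.take a.toNat).length - (List.map f (PySem.List.pyRange a b 1)).length = 0 := by
        rw [hta, List.length_map, PySem.List.length_pyRange_one]; omega
      rw [h0, List.set_cons_zero]
      have h1 : (b + 1).toNat = b.toNat + 1 := by omega
      rw [h1]
      simp [List.append_assoc]

-- ===== VERDICT (by name: the statement is the Claim_ definition above) =====
theorem worker_chunk_py_spec : Claim_equal_worker_chunk_py := by
  intro args _ hpre
  obtain ⟨gray, i0, i1, w⟩ := args
  unfold Spec_worker_chunk_py worker_chunk_py worker_chunk_py_alt
  simp only []
  rw [PySem.List.foldl_append_singleton_eq_map (fun i =>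
    (i, (PySem.List.pyRange 1 (w - 1) 1).foldl
      (fun row j => PySem.List.pySetD row j (sobel_pixel gray i j))
      (List.replicate w.toNat (0 : Int)))), List.nil_append]
  by_cases h10 : i1 ≤ i0
  · rw [if_pos h10, PySem.List.pyRange_one_eq_nil h10, List.map_nil]
  · rw [if_neg h10]
    rw [not_le] at h10
    by_cases hw : w < 3
    · rw [if_pos hw]
      simp only [PySem.List.pyRange_one_eq_nil (show w - 1 ≤ 1 by omega), List.foldl_nil]
    · rw [if_neg hw]
      rw [not_lt] at hw
      rw [show
        (let bl := (PySem.List.pyRange (i0 - 1) (i1 + 1) 1).map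
            (fun r => pvHbufs (PySem.List.pyGetD gray r []) w)
         (PySem.List.pyRange 0 (i1 - i0) 1).map (fun t =>
            let b0 := PySem.List.pyGetD bl t ([], [])
            let b1 := PySem.List.pyGetD bl (t + 1) ([], [])
            let b2 := PySem.List.pyGetD bl (t + 2) ([], [])
            let vals := (PySem.List.pyRange 0 (w - 2) 1).map (fun k =>
              let gx := PySem.List.pyGetD b0.1 k 0 + 2 * PySem.List.pyGetD b1.1 k 0 + PySem.List.pyGetD b2.1 k 0
              let gy := PySem.List.pyGetD b2.2 k 0 - PySem.List.pyGetD b0.2 k 0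
              min 255 ((Nat.sqrt (gx * gx + gy * gy).toNat : Nat) : Int))
            (i0 + t, (0 : Int) :: (vals ++ [0])))) =
        ((PySem.List.pyRange 0 (i1 - i0) 1).map (fun t =>
            let b0 := PySem.List.pyGetD ((PySem.List.pyRange (i0 - 1) (i1 + 1) 1).map
              (fun r => pvHbufs (PySem.List.pyGetD gray r []) w)) t ([], [])
            let b1 := PySem.List.pyGetD ((PySem.List.pyRange (i0 - 1) (i1 + 1) 1).map
              (fun r => pvHbufs (PySem.List.pyGetD gray r []) w)) (t + 1) ([], [])
            let b2 := PySem.List.pyGetD ((PySem.List.pyRange (i0 - 1) (i1 + 1) 1).map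
              (fun r => pvHbufs (PySem.List.pyGetD gray r []) w)) (t + 2) ([], [])
            let vals := (PySem.List.pyRange 0 (w - 2) 1).map (fun k =>
              let gx := PySem.List.pyGetD b0.1 k 0 + 2 * PySem.List.pyGetD b1.1 k 0 + PySem.List.pyGetD b2.1 k 0
              let gy := PySem.List.pyGetD b2.2 k 0 - PySem.List.pyGetD b0.2 k 0
              min 255 ((Nat.sqrt (gx * gx + gy * gy).toNat : Nat) : Int))
            (i0 + t, (0 : Int) :: (vals ++ [0])))) from rfl]
      rw [PySem.List.pyRange_one i0 i1, PySem.List.pyRange_zero (i1 - i0),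
        List.map_map, List.map_map]
      refine List.map_congr_left ?_
      intro k hk
      rw [List.mem_range] at hk
      simp only [Function.comp]
      rw [foldl_set_range (fun j => sobel_pixel gray (i0 + (k : Int)) j) _ 1 (w - 1)
        (by omega) (by omega) (by rw [List.length_replicate]; omega)]
      have ht : (List.replicate w.toNat (0 : Int)).take (Int.toNat 1) = [0] := by
        rw [List.take_replicate]
        have : min (Int.toNat 1) w.toNat = 1 := by omega
        rw [this]; rfl
      have hd : (List.replicate w.toNat (0 : Int)).drop (w - 1).toNat = [0] := by
        rw [List.drop_replicate]
        have : w.toNat - (w - 1).toNat = 1 := by omega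
        rw [this]; rfl
      rw [ht, hd]
      have e1 : ((k : Int) + 1) = ((k + 1 : Nat) : Int) := by push_cast; ring
      have e2 : ((k : Int) + 2) = ((k + 2 : Nat) : Int) := by push_cast; ring
      rw [e1, e2,
        PySem.List.pyGetD_map_pyRange_one _ (i0 - 1) (i1 + 1) k _ (by omega),
        PySem.List.pyGetD_map_pyRange_one _ (i0 - 1) (i1 + 1) (k + 1) _ (by omega),
        PySem.List.pyGetD_map_pyRange_one _ (i0 - 1) (i1 + 1) (k + 2) _ (by omega)]
      have e_r0 : (i0 - 1 + (k : Int)) = i0 + (k : Int) - 1 := by ring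
      have e_r1 : (i0 - 1 + ((k + 1 : Nat) : Int)) = i0 + (k : Int) := by push_cast; ring
      have e_r2 : (i0 - 1 + ((k + 2 : Nat) : Int)) = i0 + (k : Int) + 1 := by push_cast; ring
      rw [e_r0, e_r1, e_r2]
      refine congrArg (Prod.mk (i0 + (k : Int))) ?_
      simp only [pvHbufs, List.singleton_append]
      refine congrArg _ (congrArg (fun l => l ++ [(0 : Int)]) ?_)
      have ew : w - 1 - 1 = w - 2 := by ring
      conv_lhs => rw [PySem.List.pyRange_one 1 (w - 1), ew]
      rw [PySem.List.pyRange_zero (w - 2), List.map_map, List.map_map]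
      refine List.map_congr_left ?_
      intro c hc
      rw [List.mem_range] at hc
      simp only [Function.comp]
      rw [sobel_pixel_eq,
        PySem.List.pyGetD_map_pyRange_one _ 1 (w - 1) c _ (by omega),
        PySem.List.pyGetD_map_pyRange_one _ 1 (w - 1) c _ (by omega),
        PySem.List.pyGetD_map_pyRange_one _ 1 (w - 1) c _ (by omega),
        PySem.List.pyGetD_map_pyRange_one _ 1 (w - 1) c _ (by omega),
        PySem.List.pyGetD_map_pyRange_one _ 1 (w - 1) c _ (by omega)]
      simp only [pvGX, pvGY, pvAt]
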